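-- pv_equiv track=rewrite | github.com/Jivandhamala22/Algorithm-analyzer | diskschedulingAlgorithms.py | CSCAN
-- ===== SOURCE A (Python) =====
-- from copy import copy
--
-- def CSCAN(input_data, rwhead):
--     n = len(input_data)
--     Order = []
--     input_data_tmp=copy(input_data)
--     input_data_tmp.sort()
--     if rwhead != 0 and rwhead < input_data_tmp[n-1]:
--         input_data_tmp.append (0)
--     p = len(input_data_tmp)
--
--     i = rwhead - 1
--     Order.append(rwhead)
--     while i >= 0:
--         for j in range(0,p):
--             if(input_data_tmp[j] == i):
--                 Order.append(i)
--         i -= 1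
--
--     k = 199
--     while k > rwhead:
--         if(k == 199):
--             Order.append(k)
--         for l in range(0,n):
--             if(input_data[l] == k):
--                 Order.append(k)
--         k -= 1
--
--     Sum = 0
--     SortedReq = copy(Order)
--     SortedReq.sort()
--     for p in range(0,len(Order) - 1):
--         if (Order[p] != SortedReq[0]):
--             Sum += abs(Order[p] - Order[p+1])
--     return Order, Sum
-- ===== SOURCE B (Python) =====
-- def CSCAN(input_data, rwhead):
--     mx = max(input_data)
--     vals = list(input_data)
--     if rwhead != 0 and rwhead < mx:
--         vals.append(0)
--     below = sorted((v for v in vals if 0 <= v < rwhead), reverse=True)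
--     above = sorted((v for v in input_data if rwhead < v <= 199), reverse=True)
--     order = [rwhead] + below + (([199] + above) if rwhead < 199 else [])
--     m = min(order)
--     total = sum(abs(a - b) for a, b in zip(order, order[1:]) if a != m)
--     return order, total
-- ===== Notes on version B (the rewrite author's own statement) =====
-- stated objective: faster
-- what changed: B replaces A's integer-by-integer sweeps (i from rwhead-1 down to 0 and k from 199 down to rwhead+1, each rescanning the request list) with two sorted filters of the request list plus a zip-based sum, so the cost depends on the number of requests, not on the size of the integer range.
-- outside the precondition, e.g. on CSCAN([], 0): A returns ([0, 199], 0), B raises ValueError; on CSCAN([], 5): A raises IndexError, B raises ValueError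
import Mathlib
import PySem

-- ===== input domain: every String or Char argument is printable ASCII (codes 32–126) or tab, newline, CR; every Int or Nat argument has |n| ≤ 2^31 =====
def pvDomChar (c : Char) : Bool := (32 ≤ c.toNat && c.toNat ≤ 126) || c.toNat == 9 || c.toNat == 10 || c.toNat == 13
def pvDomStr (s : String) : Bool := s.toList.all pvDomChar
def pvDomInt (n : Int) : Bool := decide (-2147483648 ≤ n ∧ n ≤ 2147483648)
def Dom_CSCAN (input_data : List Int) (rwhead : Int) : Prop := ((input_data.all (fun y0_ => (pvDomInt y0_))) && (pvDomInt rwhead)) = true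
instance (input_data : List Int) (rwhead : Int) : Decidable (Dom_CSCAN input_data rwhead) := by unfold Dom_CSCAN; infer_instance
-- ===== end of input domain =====

-- B replaces A's integer-by-integer downward sweeps with two sorted filters of the request
-- list plus a zip-based sum (objective: faster — cost depends on n, not on the integer range).

-- ===== PORT A =====
-- while i >= 0: for j in range(0,p): if tmp[j]==i: Order.append(i); i -= 1
def cscanLoopDown (tmp : List Int) (i : Int) (order : List Int) : List Int :=
  if 0 ≤ i then
    cscanLoopDown tmp (i - 1) (tmp.foldl (fun acc x => if x == i then acc ++ [i] else acc) order)
  else order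
termination_by (i + 1).toNat
decreasing_by omega

-- while k > rwhead: if k==199: Order.append(k); for l in range(0,n): if input_data[l]==k: Order.append(k); k -= 1
def cscanLoopUp (input_data : List Int) (rwhead k : Int) (order : List Int) : List Int :=
  if rwhead < k then
    cscanLoopUp input_data rwhead (k - 1)
      (input_data.foldl (fun acc x => if x == k then acc ++ [k] else acc)
        (if k == 199 then order ++ [199] else order))
  else order
termination_by (k - rwhead).toNat
decreasing_by omega

def CSCAN (input_data : List Int) (rwhead : Int) : List Int × Int :=
  let n := input_data.length
  let tmp0 := PySem.List.sorted input_data (fun x => x) false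
  -- 'rwhead != 0 and rwhead < input_data_tmp[n-1]' short-circuits: the index is read only if rwhead ≠ 0
  match (if rwhead ≠ 0 then
           (PySem.List.pyGet? tmp0 ((n : Int) - 1)).map
             (fun last => if rwhead < last then tmp0 ++ [0] else tmp0)
         else some tmp0) with
  | none => ([], 0)   -- unreachable under Pre_: Python raises IndexError on [] with rwhead ≠ 0
  | some tmp =>
    let order1 := cscanLoopDown tmp (rwhead - 1) [rwhead]
    let order := cscanLoopUp input_data rwhead 199 order1
    let sortedReq := PySem.List.sorted order (fun x => x) false
    let sum := (PySem.List.pyRange 0 ((order.length : Int) - 1)).foldl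
      (fun s p => if PySem.List.pyGetD order p 0 ≠ PySem.List.pyGetD sortedReq 0 0
                  then s + |PySem.List.pyGetD order p 0 - PySem.List.pyGetD order (p + 1) 0| else s) 0
    (order, sum)

-- ===== PORT B =====
def CSCAN_alt (input_data : List Int) (rwhead : Int) : List Int × Int :=
  match PySem.List.max? input_data (fun x => x) with
  | none => ([], 0)   -- unreachable under Pre_: Python raises ValueError on []
  | some mx =>
    let vals := if rwhead ≠ 0 ∧ rwhead < mx then input_data ++ [0] else input_data
    let below := PySem.List.sorted (vals.filter (fun v => decide (0 ≤ v ∧ v < rwhead))) (fun x => x) true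
    let above := PySem.List.sorted (input_data.filter (fun v => decide (rwhead < v ∧ v ≤ 199))) (fun x => x) true
    let order := rwhead :: below ++ (if rwhead < 199 then 199 :: above else [])
    let m := (PySem.List.min? order (fun x => x)).getD 0
    let total := (((order.zip order.tail).filter (fun ab => ab.1 ≠ m)).map (fun ab => |ab.1 - ab.2|)).sum
    (order, total)

-- ===== PRECONDITION & SPEC =====
-- Pre_ excludes only the empty request list: there A raises IndexError when rwhead ≠ 0, and for
-- rwhead = 0 its phantom schedule for zero requests is an artefact of the sweep, while B's max() raises ValueError.
def Pre_CSCAN (input_data : List Int) (rwhead : Int) : Prop := input_data ≠ []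
instance (input_data : List Int) (rwhead : Int) : Decidable (Pre_CSCAN input_data rwhead) := by unfold Pre_CSCAN; infer_instance
def pvWitness_CSCAN : List Int × Int := ([50, 120, 50, 7], 60)

def Spec_CSCAN (input_data : List Int) (rwhead : Int) (out : List Int × Int) : Prop := out = CSCAN_alt input_data rwhead
instance (input_data : List Int) (rwhead : Int) (out : List Int × Int) : Decidable (Spec_CSCAN input_data rwhead out) := by unfold Spec_CSCAN; infer_instance

-- ===== CLAIM (what is proved, stated in full; the proofs are below) =====
def Claim_equal_CSCAN : Prop := ∀ (input_data : List Int) (rwhead : Int), Dom_CSCAN input_data rwhead → Pre_CSCAN input_data rwhead → Spec_CSCAN input_data rwhead (CSCAN input_data rwhead)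

-- ===== LEMMAS AND PROOFS =====

-- descending value blocks collected by A's two integer sweeps
def blocksDown (tmp : List Int) (i : Int) : List Int :=
  if 0 ≤ i then List.replicate (tmp.count i) i ++ blocksDown tmp (i - 1) else []
termination_by (i + 1).toNat
decreasing_by omega

def blocksUp (xs : List Int) (rwhead k : Int) : List Int :=
  if rwhead < k then List.replicate (xs.count k) k ++ blocksUp xs rwhead (k - 1) else []
termination_by (k - rwhead).toNat
decreasing_by omega

theorem foldl_eq_replicate (tmp : List Int) (i : Int) (ord : List Int) :
    tmp.foldl (fun acc x => if x == i then acc ++ [i] else acc) ord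
      = ord ++ List.replicate (tmp.count i) i := by
  rw [PySem.List.foldl_append_if (p := fun x => x == i) (f := fun _ => i)]
  congr 1
  rw [List.map_const']
  rw [List.count, List.countP_eq_length_filter]

theorem cscanLoopDown_neg (tmp : List Int) (i : Int) (ord : List Int) (h : i < 0) :
    cscanLoopDown tmp i ord = ord := by
  rw [cscanLoopDown, if_neg (by omega)]

theorem blocksDown_neg (tmp : List Int) (i : Int) (h : i < 0) :
    blocksDown tmp i = [] := by
  rw [blocksDown, if_neg (by omega)]

theorem cscanLoopDown_spec (tmp : List Int) (i : Int) (ord : List Int) :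
    cscanLoopDown tmp i ord = ord ++ blocksDown tmp i := by
  rcases Int.lt_or_le i 0 with h | h
  · rw [cscanLoopDown_neg _ _ _ h, blocksDown_neg _ _ h, List.append_nil]
  · obtain ⟨j, rfl⟩ : ∃ j : Nat, i = (j : Int) := ⟨i.toNat, (Int.toNat_of_nonneg h).symm⟩
    clear h
    induction j generalizing ord with
    | zero =>
      rw [cscanLoopDown, if_pos (by omega), blocksDown, if_pos (by omega)]
      rw [cscanLoopDown_neg _ _ _ (by omega), blocksDown_neg _ _ (by omega)]
      rw [foldl_eq_replicate]
      simp
    | succ k ih =>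
      rw [cscanLoopDown, if_pos (by omega), blocksDown, if_pos (by omega)]
      have hc : ((k + 1 : Nat) : Int) - 1 = (k : Int) := by push_cast; ring
      rw [hc, ih, foldl_eq_replicate, List.append_assoc]

theorem mem_blocksDown {tmp : List Int} {i x : Int} (hx : x ∈ blocksDown tmp i) :
    0 ≤ x ∧ x ≤ i ∧ x ∈ tmp := by
  rcases Int.lt_or_le i 0 with h | h
  · rw [blocksDown_neg _ _ h] at hx; simp at hx
  · obtain ⟨j, rfl⟩ : ∃ j : Nat, i = (j : Int) := ⟨i.toNat, (Int.toNat_of_nonneg h).symm⟩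
    clear h
    induction j with
    | zero =>
      rw [blocksDown, if_pos (by omega), blocksDown_neg _ _ (by omega), List.append_nil] at hx
      rw [List.mem_replicate] at hx
      obtain ⟨hn, rfl⟩ := hx
      exact ⟨le_refl _, le_refl _, List.count_pos_iff.mp (Nat.pos_of_ne_zero hn)⟩
    | succ k ih =>
      rw [blocksDown, if_pos (by omega), List.mem_append] at hx
      have hc : ((k + 1 : Nat) : Int) - 1 = (k : Int) := by push_cast; ring
      rcases hx with hx | hx
      · rw [List.mem_replicate] at hx
        obtain ⟨hn, rfl⟩ := hx
        exact ⟨by omega, le_refl _, List.count_pos_iff.mp (Nat.pos_of_ne_zero hn)⟩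
      · rw [hc] at hx
        obtain ⟨h1, h2, h3⟩ := ih hx
        exact ⟨h1, by omega, h3⟩

theorem count_blocksDown (tmp : List Int) (i v : Int) :
    (blocksDown tmp i).count v = if 0 ≤ v ∧ v ≤ i then tmp.count v else 0 := by
  rcases Int.lt_or_le i 0 with h | h
  · rw [blocksDown_neg _ _ h]; simp; omega
  · obtain ⟨j, rfl⟩ : ∃ j : Nat, i = (j : Int) := ⟨i.toNat, (Int.toNat_of_nonneg h).symm⟩
    clear h
    induction j with
    | zero =>
      rw [blocksDown, if_pos (by omega), blocksDown_neg _ _ (by omega), List.append_nil,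
        List.count_replicate]
      simp only [beq_iff_eq]
      split_ifs with h1 h2 h2 <;> try omega
      · subst h1; rfl
    | succ k ih =>
      have hc : ((k + 1 : Nat) : Int) - 1 = (k : Int) := by push_cast; ring
      rw [blocksDown, if_pos (by omega), List.count_append, hc, ih, List.count_replicate]
      simp only [beq_iff_eq]
      split_ifs with h1 h2 h3 <;> try omega
      all_goals subst h1; omega

theorem pairwise_blocksDown (tmp : List Int) (i : Int) :
    (blocksDown tmp i).Pairwise (fun a b => b ≤ a) := by
  rcases Int.lt_or_le i 0 with h | h
  · rw [blocksDown_neg _ _ h]; exact List.Pairwise.nil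
  · obtain ⟨j, rfl⟩ : ∃ j : Nat, i = (j : Int) := ⟨i.toNat, (Int.toNat_of_nonneg h).symm⟩
    clear h
    induction j with
    | zero =>
      rw [blocksDown, if_pos (by omega), blocksDown_neg _ _ (by omega), List.append_nil]
      exact List.pairwise_replicate.mpr (Or.inr (le_refl _))
    | succ k ih =>
      have hc : ((k + 1 : Nat) : Int) - 1 = (k : Int) := by push_cast; ring
      rw [blocksDown, if_pos (by omega), hc]
      refine List.pairwise_append.mpr ⟨List.pairwise_replicate.mpr (Or.inr (le_refl _)), ih, ?_⟩
      intro a ha b hb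
      rcases List.mem_replicate.mp ha with ⟨_, rfl⟩
      have := mem_blocksDown hb
      omega

theorem cscanLoopUp_le (xs : List Int) (rwhead k : Int) (ord : List Int) (h : k ≤ rwhead) :
    cscanLoopUp xs rwhead k ord = ord := by
  rw [cscanLoopUp, if_neg (by omega)]

theorem blocksUp_le (xs : List Int) (rwhead k : Int) (h : k ≤ rwhead) :
    blocksUp xs rwhead k = [] := by
  rw [blocksUp, if_neg (by omega)]

theorem cscanLoopUp_spec (xs : List Int) (rwhead k : Int) (ord : List Int) (hk : k ≤ 198) :
    cscanLoopUp xs rwhead k ord = ord ++ blocksUp xs rwhead k := by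
  by_cases h : k ≤ rwhead
  · rw [cscanLoopUp_le _ _ _ _ h, blocksUp_le _ _ _ h, List.append_nil]
  · obtain ⟨j, hj⟩ : ∃ j : Nat, k = rwhead + 1 + (j : Int) :=
      ⟨(k - rwhead - 1).toNat, by omega⟩
    subst hj
    clear h
    induction j generalizing ord with
    | zero =>
      have hg : ((rwhead + 1 + ((0 : Nat) : Int)) == 199) = false := by
        rw [beq_eq_false_iff_ne]; omega
      rw [cscanLoopUp, if_pos (by omega), hg]
      simp only [Bool.false_eq_true, if_false]
      rw [cscanLoopUp_le _ _ _ _ (by omega), foldl_eq_replicate]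
      rw [blocksUp, if_pos (by omega), blocksUp_le _ _ _ (by omega)]
      simp
    | succ m ih =>
      have hg : ((rwhead + 1 + ((m + 1 : Nat) : Int)) == 199) = false := by
        rw [beq_eq_false_iff_ne]; push_cast at hk ⊢; omega
      have hc : rwhead + 1 + ((m + 1 : Nat) : Int) - 1 = rwhead + 1 + (m : Int) := by
        push_cast; ring
      rw [cscanLoopUp, if_pos (by omega), hg]
      simp only [Bool.false_eq_true, if_false]
      rw [hc, ih _ (by push_cast at hk ⊢; omega), foldl_eq_replicate]
      conv_rhs => rw [blocksUp, if_pos (by omega), hc]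
      rw [List.append_assoc]

theorem mem_blocksUp {xs : List Int} {rwhead k x : Int} (hx : x ∈ blocksUp xs rwhead k) :
    rwhead < x ∧ x ≤ k ∧ x ∈ xs := by
  by_cases h : k ≤ rwhead
  · rw [blocksUp_le _ _ _ h] at hx; simp at hx
  · obtain ⟨j, hj⟩ : ∃ j : Nat, k = rwhead + 1 + (j : Int) :=
      ⟨(k - rwhead - 1).toNat, by omega⟩
    subst hj
    clear h
    induction j with
    | zero =>
      rw [blocksUp, if_pos (by omega), blocksUp_le _ _ _ (by omega), List.append_nil,
        List.mem_replicate] at hx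
      obtain ⟨hn, rfl⟩ := hx
      exact ⟨by omega, le_refl _, List.count_pos_iff.mp (Nat.pos_of_ne_zero hn)⟩
    | succ m ih =>
      rw [blocksUp, if_pos (by omega), List.mem_append] at hx
      have hc : rwhead + 1 + ((m + 1 : Nat) : Int) - 1 = rwhead + 1 + (m : Int) := by
        push_cast; ring
      rcases hx with hx | hx
      · rw [List.mem_replicate] at hx
        obtain ⟨hn, rfl⟩ := hx
        exact ⟨by omega, le_refl _, List.count_pos_iff.mp (Nat.pos_of_ne_zero hn)⟩
      · rw [hc] at hx
        obtain ⟨h1, h2, h3⟩ := ih hx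
        exact ⟨h1, by push_cast at h2 ⊢; omega, h3⟩

theorem count_blocksUp (xs : List Int) (rwhead k v : Int) :
    (blocksUp xs rwhead k).count v = if rwhead < v ∧ v ≤ k then xs.count v else 0 := by
  by_cases h : k ≤ rwhead
  · rw [blocksUp_le _ _ _ h]; simp; omega
  · obtain ⟨j, hj⟩ : ∃ j : Nat, k = rwhead + 1 + (j : Int) :=
      ⟨(k - rwhead - 1).toNat, by omega⟩
    subst hj
    clear h
    induction j with
    | zero =>
      rw [blocksUp, if_pos (by omega), blocksUp_le _ _ _ (by omega), List.append_nil,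
        List.count_replicate]
      simp only [beq_iff_eq]
      split_ifs with h1 h2 h2 <;> try omega
      · subst h1; rfl
    | succ m ih =>
      have hc : rwhead + 1 + ((m + 1 : Nat) : Int) - 1 = rwhead + 1 + (m : Int) := by
        push_cast; ring
      rw [blocksUp, if_pos (by omega), List.count_append, hc, ih, List.count_replicate]
      simp only [beq_iff_eq]
      split_ifs with h1 h2 h3 <;> try omega
      all_goals subst h1; omega

theorem pairwise_blocksUp (xs : List Int) (rwhead k : Int) :
    (blocksUp xs rwhead k).Pairwise (fun a b => b ≤ a) := by
  by_cases h : k ≤ rwhead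
  · rw [blocksUp_le _ _ _ h]; exact List.Pairwise.nil
  · obtain ⟨j, hj⟩ : ∃ j : Nat, k = rwhead + 1 + (j : Int) :=
      ⟨(k - rwhead - 1).toNat, by omega⟩
    subst hj
    clear h
    induction j with
    | zero =>
      rw [blocksUp, if_pos (by omega), blocksUp_le _ _ _ (by omega), List.append_nil]
      exact List.pairwise_replicate.mpr (Or.inr (le_refl _))
    | succ m ih =>
      have hc : rwhead + 1 + ((m + 1 : Nat) : Int) - 1 = rwhead + 1 + (m : Int) := by
        push_cast; ring
      rw [blocksUp, if_pos (by omega), hc]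
      refine List.pairwise_append.mpr ⟨List.pairwise_replicate.mpr (Or.inr (le_refl _)), ih, ?_⟩
      intro a ha b hb
      rcases List.mem_replicate.mp ha with ⟨_, rfl⟩
      have := mem_blocksUp hb
      push_cast at *
      omega

theorem eq_of_perm_of_desc {l₁ l₂ : List Int} (hp : l₁.Perm l₂)
    (h₁ : l₁.Pairwise (fun a b => b ≤ a)) (h₂ : l₂.Pairwise (fun a b => b ≤ a)) : l₁ = l₂ := by
  exact List.Perm.eq_of_pairwise (fun a b _ _ hab hba => le_antisymm hba hab) h₁ h₂ hp

theorem desc_eq_sorted_rev (l ys : List Int) (hp : ys.Perm l)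
    (hd : ys.Pairwise (fun a b => b ≤ a)) :
    ys = PySem.List.sorted l (fun x => x) true := by
  refine eq_of_perm_of_desc ?_ hd ?_
  · exact hp.trans (PySem.List.sorted_perm l (fun x => x) true).symm
  · exact PySem.List.sorted_pairwise_rev _ _

theorem count_filter_eq (p : Int → Bool) (l : List Int) (v : Int) :
    (l.filter p).count v = if p v then l.count v else 0 := by
  by_cases hv : p v
  · rw [if_pos hv, List.count_filter hv]
  · rw [if_neg hv, List.count_eq_zero]
    intro hm
    exact hv (List.of_mem_filter hm)

theorem blocksDown_eq_sorted (tmp vals : List Int) (rwhead : Int) (hperm : tmp.Perm vals) :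
    blocksDown tmp (rwhead - 1)
      = PySem.List.sorted (vals.filter (fun v => decide (0 ≤ v ∧ v < rwhead))) (fun x => x) true := by
  refine desc_eq_sorted_rev _ _ ?_ (pairwise_blocksDown _ _)
  rw [List.perm_iff_count]
  intro v
  rw [count_blocksDown, count_filter_eq, hperm.count_eq]
  split_ifs with h1 h2 h2 <;> try rfl
  all_goals simp only [decide_eq_true_eq] at h2 <;> omega

theorem blocksUp_eq_sorted (xs : List Int) (rwhead : Int) :
    blocksUp xs rwhead 199
      = PySem.List.sorted (xs.filter (fun v => decide (rwhead < v ∧ v ≤ 199))) (fun x => x) true := by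
  refine desc_eq_sorted_rev _ _ ?_ (pairwise_blocksUp _ _ _)
  rw [List.perm_iff_count]
  intro v
  rw [count_blocksUp, count_filter_eq]
  split_ifs with h1 h2 h2 <;> try rfl
  all_goals simp only [decide_eq_true_eq] at h2 <;> omega

theorem sorted_last_eq_max (xs : List Int) (mx : Int)
    (hmx : PySem.List.max? xs (fun x => x) = some mx) :
    PySem.List.pyGet? (PySem.List.sorted xs (fun x => x) false) ((xs.length : Int) - 1) = some mx := by
  have hne : xs ≠ [] := by
    intro h; subst h; rw [(PySem.List.max?_eq_none_iff _ _).mpr rfl] at hmx; cases hmx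
  have hlen : (PySem.List.sorted xs (fun x => x) false).length = xs.length :=
    PySem.List.length_sorted _ _ _
  have hpos : 0 < xs.length := List.length_pos_iff.mpr hne
  have hlt : xs.length - 1 < (PySem.List.sorted xs (fun x => x) false).length := by omega
  have hget : PySem.List.pyGet? (PySem.List.sorted xs (fun x => x) false) ((xs.length : Int) - 1)
      = some ((PySem.List.sorted xs (fun x => x) false)[xs.length - 1]'hlt) := by
    have : ((xs.length : Int) - 1) = ((xs.length - 1 : Nat) : Int) := by omega
    rw [this, PySem.List.pyGet?_natCast]
    simp [List.getElem?_eq_getElem hlt]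
  rw [hget]
  congr 1
  have hmem : (PySem.List.sorted xs (fun x => x) false)[xs.length - 1]'hlt ∈ xs := by
    rw [← PySem.List.mem_sorted xs (fun x => x) false]
    exact List.getElem_mem _
  have hle : (PySem.List.sorted xs (fun x => x) false)[xs.length - 1]'hlt ≤ mx :=
    PySem.List.max?_isMax hmx _ hmem
  have hmem2 : mx ∈ PySem.List.sorted xs (fun x => x) false :=
    (PySem.List.mem_sorted _ _ _ _).mpr (PySem.List.max?_mem hmx)
  obtain ⟨p, hp, hpe⟩ := List.mem_iff_getElem.mp hmem2
  have hge : mx ≤ (PySem.List.sorted xs (fun x => x) false)[xs.length - 1]'hlt := by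
    rw [← hpe]
    exact PySem.List.sorted_id_getElem_mono xs (by omega) hlt
  omega

theorem sorted_head_eq_min (l : List Int) (m : Int)
    (hm : PySem.List.min? l (fun x => x) = some m) :
    (PySem.List.sorted l (fun x => x) false).getD 0 0 = m := by
  have hne : l ≠ [] := by
    intro h; subst h; rw [(PySem.List.min?_eq_none_iff _ _).mpr rfl] at hm; cases hm
  obtain ⟨h, t, hht⟩ : ∃ h t, PySem.List.sorted l (fun x => x) false = h :: t := by
    rcases he : PySem.List.sorted l (fun x => x) false with _ | ⟨h, t⟩
    · exact absurd ((PySem.List.sorted_eq_nil_iff _ _ _).mp he) hne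
    · exact ⟨h, t, rfl⟩
  rw [hht]
  have hmem : h ∈ l := by
    have : h ∈ PySem.List.sorted l (fun x => x) false := by rw [hht]; exact List.mem_cons_self
    exact (PySem.List.mem_sorted _ _ _ _).mp this
  have h1 : m ≤ h := PySem.List.min?_isMin hm _ hmem
  have h2 : h ≤ m := PySem.List.key_head_sorted_le _ _ hht _ (PySem.List.min?_mem hm)
  rw [List.getD_cons_zero]
  omega

theorem sum_loop_eq_zip (O : List Int) (m : Int) :
    (PySem.List.pyRange 0 ((O.length : Int) - 1)).foldl
      (fun s p => if PySem.List.pyGetD O p 0 ≠ m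
                  then s + |PySem.List.pyGetD O p 0 - PySem.List.pyGetD O (p + 1) 0| else s) 0
      = (((O.zip O.tail).filter (fun ab => ab.1 ≠ m)).map (fun ab => |ab.1 - ab.2|)).sum := by
  rcases O with _ | ⟨a, t⟩
  · rw [PySem.List.pyRange_one_eq_nil (by simp)]
    simp
  · set O := a :: t with hO
    set P := O.zip O.tail with hP
    have hPlen : P.length = O.length - 1 := by
      rw [hP, List.length_zip, List.length_tail]
      omega
    have hlen1 : 1 ≤ O.length := by simp [hO]
    have hbound : (O.length : Int) - 1 = (P.length : Int) := by omega
    rw [hbound]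
    have hcongr : (PySem.List.pyRange 0 ((P.length : Int))).foldl
        (fun s p => if PySem.List.pyGetD O p 0 ≠ m
                  then s + |PySem.List.pyGetD O p 0 - PySem.List.pyGetD O (p + 1) 0| else s) 0
        = (PySem.List.pyRange 0 ((P.length : Int))).foldl
        (fun s p => (fun acc (ab : Int × Int) => if ab.1 ≠ m then acc + |ab.1 - ab.2| else acc) s
          (PySem.List.pyGetD P p (0, 0))) 0 := by
      refine PySem.List.foldl_congr_mem _ _ _ _ ?_
      intro acc p hp
      rw [PySem.List.mem_pyRange_one] at hp
      obtain ⟨n, rfl⟩ : ∃ n : Nat, p = (n : Int) := ⟨p.toNat, (Int.toNat_of_nonneg hp.1).symm⟩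
      have hn : n < P.length := by omega
      have hn1 : n + 1 < O.length := by omega
      have hgp : PySem.List.pyGetD P (n : Int) (0, 0) = P[n]'hn := by
        rw [PySem.List.pyGetD_natCast, List.getD_eq_getElem _ _ hn]
      have hg0 : PySem.List.pyGetD O (n : Int) 0 = O[n]'(by omega) := by
        rw [PySem.List.pyGetD_natCast, List.getD_eq_getElem _ _ (by omega)]
      have hg1 : PySem.List.pyGetD O ((n : Int) + 1) 0 = O[n + 1]'hn1 := by
        have : ((n : Int) + 1) = ((n + 1 : Nat) : Int) := by omega
        rw [this, PySem.List.pyGetD_natCast, List.getD_eq_getElem _ _ hn1]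
      have hPn : P[n]'hn = (O[n]'(by omega), O[n + 1]'hn1) := by
        simp only [hP, List.getElem_zip, List.getElem_tail]
      rw [hg0, hg1, hgp, hPn]
    rw [hcongr, PySem.List.foldl_pyRange_zero_pyGetD' P (0, 0)
      (fun acc ab => if ab.1 ≠ m then acc + |ab.1 - ab.2| else acc) 0]
    rw [PySem.List.foldl_ite_eq_foldl_filter (p := fun ab : Int × Int => ab.1 ≠ m)
      (f := fun acc ab => acc + |ab.1 - ab.2|)]
    rw [PySem.List.foldl_add]
    simp

theorem cscanLoopUp_199 (xs : List Int) (rwhead : Int) (ord : List Int) :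
    cscanLoopUp xs rwhead 199 ord
      = ord ++ (if rwhead < 199 then 199 :: blocksUp xs rwhead 199 else []) := by
  by_cases h : rwhead < 199
  · rw [cscanLoopUp, if_pos h, if_pos (show ((199 : Int) == 199) = true from rfl)]
    rw [foldl_eq_replicate, cscanLoopUp_spec _ _ _ _ (by norm_num)]
    rw [if_pos h]
    conv_rhs => rw [blocksUp, if_pos h]
    simp
  · rw [cscanLoopUp_le _ _ _ _ (by omega), if_neg h, List.append_nil]

-- ===== VERDICT (by name: the statement is the Claim_ definition above) =====
theorem CSCAN_spec : Claim_equal_CSCAN := by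
  intro input_data rwhead _ hpre
  unfold Spec_CSCAN
  obtain ⟨mx, hmx⟩ : ∃ mx, PySem.List.max? input_data (fun x => x) = some mx := by
    rcases hm : PySem.List.max? input_data (fun x => x) with _ | mx
    · exact absurd ((PySem.List.max?_eq_none_iff _ _).mp hm) hpre
    · exact ⟨mx, rfl⟩
  have hA := sorted_last_eq_max input_data mx hmx
  have hsel : (if rwhead ≠ 0 then
        (PySem.List.pyGet? (PySem.List.sorted input_data (fun x => x) false)
            ((input_data.length : Int) - 1)).map
          (fun last => if rwhead < last then PySem.List.sorted input_data (fun x => x) false ++ [0]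
                       else PySem.List.sorted input_data (fun x => x) false)
      else some (PySem.List.sorted input_data (fun x => x) false))
      = some (if rwhead ≠ 0 ∧ rwhead < mx then PySem.List.sorted input_data (fun x => x) false ++ [0]
              else PySem.List.sorted input_data (fun x => x) false) := by
    by_cases h0 : rwhead = 0
    · simp [h0]
    · simp [h0, hA]
  simp only [CSCAN, CSCAN_alt, hsel, hmx]
  set S := PySem.List.sorted input_data (fun x => x) false with hS
  set tmp := if rwhead ≠ 0 ∧ rwhead < mx then S ++ [0] else S with htmp
  set vals := if rwhead ≠ 0 ∧ rwhead < mx then input_data ++ [0] else input_data with hvals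
  have hperm : tmp.Perm vals := by
    rw [htmp, hvals]
    split_ifs
    · exact (PySem.List.sorted_perm input_data (fun x => x) false).append_right _
    · exact PySem.List.sorted_perm _ _ _
  set below := PySem.List.sorted (vals.filter (fun v => decide (0 ≤ v ∧ v < rwhead))) (fun x => x) true with hbelow
  set above := PySem.List.sorted (input_data.filter (fun v => decide (rwhead < v ∧ v ≤ 199))) (fun x => x) true with habove
  set O := rwhead :: below ++ (if rwhead < 199 then 199 :: above else []) with hOrder
  have horder : cscanLoopUp input_data rwhead 199 (cscanLoopDown tmp (rwhead - 1) [rwhead]) = O := by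
    rw [cscanLoopDown_spec, cscanLoopUp_199, blocksDown_eq_sorted tmp vals rwhead hperm,
      blocksUp_eq_sorted, hOrder, ← hbelow, ← habove]
    simp
  rw [horder]
  obtain ⟨m0, hm0⟩ : ∃ m0, PySem.List.min? O (fun x => x) = some m0 := by
    rcases hm : PySem.List.min? O (fun x => x) with _ | m0
    · have := (PySem.List.min?_eq_none_iff _ _).mp hm
      rw [hOrder] at this
      cases this
    · exact ⟨m0, rfl⟩
  have hmin : PySem.List.pyGetD (PySem.List.sorted O (fun x => x) false) 0 0 = m0 := by
    rw [show (0 : Int) = ((0 : Nat) : Int) from rfl, PySem.List.pyGetD_natCast]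
    exact sorted_head_eq_min O m0 hm0
  simp only [hmin, hm0, Option.getD_some]
  rw [sum_loop_eq_zip O m0]
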